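-- pv_equiv track=rewrite | github.com/Healer-H/carebot-backend | chatbot_service/core/response_formatter.py | _format_bullet_points
-- ===== SOURCE A (Python) =====
-- def _format_bullet_points(content: str) -> str:
--     """
--     Định dạng danh sách dấu gạch đầu dòng
--     """
--     lines = content.split('\n')
--     formatted_lines = []
--
--     for line in lines:
--         # Chuyển đổi dòng bắt đầu bằng "- " thành dạng bullet point chuẩn
--         if line.startswith("- "):
--             formatted_lines.append("• " + line[2:])
--         else:
--             formatted_lines.append(line)
--
--     return '\n'.join(formatted_lines)
-- ===== SOURCE B (Python) =====
-- def _format_bullet_points(content: str) -> str: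
--     # Single pass over the character stream: replace "- " only when standing
--     # at the start of the text or right after a newline.
--     out = []
--     at_start = True
--     i = 0
--     n = len(content)
--     while i < n:
--         if at_start and content.startswith("- ", i):
--             out.append("\u2022 ")
--             i += 2
--             at_start = False
--         else:
--             c = content[i]
--             out.append(c)
--             at_start = (c == "\n")
--             i += 1
--     return "".join(out)
-- ===== Notes on version B (the rewrite author's own statement) =====
-- stated objective: alternative
-- what changed: Replaces split('\n')/per-line loop/'\n'.join with one streaming scan over the characters that tracks an at-line-start flag and rewrites '- ' in place; no line list is built.
import Mathlib
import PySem

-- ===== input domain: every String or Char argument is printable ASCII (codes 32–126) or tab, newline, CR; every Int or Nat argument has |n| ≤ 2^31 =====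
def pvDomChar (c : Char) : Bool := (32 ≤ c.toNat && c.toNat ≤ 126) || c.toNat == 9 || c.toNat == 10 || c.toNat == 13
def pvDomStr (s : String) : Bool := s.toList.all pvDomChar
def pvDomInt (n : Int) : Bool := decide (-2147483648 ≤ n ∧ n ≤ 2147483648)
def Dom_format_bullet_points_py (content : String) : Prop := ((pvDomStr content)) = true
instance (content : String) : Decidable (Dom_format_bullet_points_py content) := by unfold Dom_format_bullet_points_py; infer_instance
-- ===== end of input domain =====

-- B replaces A's split('\n') / per-line loop / join with a single streaming scan over the characters tracking a line-start flag (alternative decomposition, same cost).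

-- ===== PORT A =====
-- literal transliteration: split on '\n', transform each line in a fold, join back
def format_bullet_points_py (content : String) : String :=
  let lines := (PySem.Chars.split? content.toList ['\n']).getD []
  let formatted_lines := lines.foldl (fun acc line =>
    acc ++ [if PySem.Chars.startswith line ['-', ' ']
            then '•' :: ' ' :: PySem.Chars.slice line (some 2) none
            else line]) []
  String.ofList (PySem.Chars.join ['\n'] formatted_lines)

-- ===== PORT B =====
-- streaming scan (Source B's while loop as structural recursion); atStart = "at start of text or just after '\n'"
def fbpGo : Bool → List Char → List Char
  | _, [] => []
  | atStart, c :: rest =>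
    if atStart = true ∧ c = '-' ∧ rest.head? = some ' ' then
      '•' :: ' ' :: fbpGo false rest.tail
    else
      c :: fbpGo (c == '\n') rest
termination_by _ cs => cs.length
decreasing_by all_goals simp [List.length_tail]; try omega

def format_bullet_points_py_alt (content : String) : String :=
  String.ofList (fbpGo true content.toList)

-- ===== PRECONDITION & SPEC =====
def Spec_format_bullet_points_py (content : String) (out : String) : Prop := out = format_bullet_points_py_alt content
instance (content : String) (out : String) : Decidable (Spec_format_bullet_points_py content out) := by unfold Spec_format_bullet_points_py; infer_instance

-- ===== CLAIM (what is proved, stated in full; the proofs are below) =====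
def Claim_equal_format_bullet_points_py : Prop := ∀ (content : String), Dom_format_bullet_points_py content → Spec_format_bullet_points_py content (format_bullet_points_py content)

-- ===== LEMMAS AND PROOFS =====

-- A's per-line transform, named for the proofs (definitionally the lambda in port A's fold)
def fbpLine (line : List Char) : List Char :=
  if PySem.Chars.startswith line ['-', ' ']
  then '•' :: ' ' :: PySem.Chars.slice line (some 2) none
  else line

-- structural split on '\n' with a reversed current-line accumulator
def fbpSp : List Char → List Char → List (List Char)
  | [], cur => [cur.reverse]
  | c :: rest, cur => if c = '\n' then cur.reverse :: fbpSp rest [] else fbpSp rest (c :: cur)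

theorem fbpSp_cons (cs : List Char) : ∀ cur, ∃ t ls,
    fbpSp cs [] = t :: ls ∧ fbpSp cs cur = (cur.reverse ++ t) :: ls := by
  induction cs with
  | nil => intro cur; exact ⟨[], [], rfl, by simp [fbpSp]⟩
  | cons c rest ih =>
    intro cur
    by_cases h : c = '\n'
    · exact ⟨[], fbpSp rest [], by simp [fbpSp, h], by simp [fbpSp, h]⟩
    · obtain ⟨t, ls, h1, h2⟩ := ih [c]
      obtain ⟨t', ls', h1', h2'⟩ := ih (c :: cur)
      refine ⟨c :: t, ls, by simpa [fbpSp, h] using h2, ?_⟩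
      rw [show fbpSp (c :: rest) cur = fbpSp rest (c :: cur) by simp [fbpSp, h], h2']
      have heq : t' :: ls' = t :: ls := h1'.symm.trans h1
      injection heq with ht hls
      simp [ht, hls]

-- a nonempty first line of fbpSp starts with the first character of the input
theorem fbpSp_head_sub (rest t : List Char) (ls : List (List Char))
    (h : fbpSp rest [] = t :: ls) (ch : Char) (hh : t.head? = some ch) :
    rest.head? = some ch := by
  match rest with
  | [] =>
    rw [show fbpSp ([] : List Char) [] = [[]] from rfl] at h
    injection h with ht _
    rw [← ht] at hh; simp at hh
  | r :: rr =>
    by_cases hr : r = '\n'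
    · rw [show fbpSp (r :: rr) [] = [] :: fbpSp rr [] by simp [fbpSp, hr]] at h
      injection h with ht _
      rw [← ht] at hh; simp at hh
    · obtain ⟨t', ls', h1, h2⟩ := fbpSp_cons rr [r]
      rw [show fbpSp (r :: rr) [] = fbpSp rr [r] by simp [fbpSp, hr], h2] at h
      injection h with ht _
      simp [← ht] at hh
      simp [hh]

-- the fuel-based PySem splitter agrees with fbpSp when fuel suffices
theorem go_spec : ∀ (fuel : Nat) (l cur : List Char) (acc : List (List Char)),
    l.length < fuel →
    PySem.Chars.splitOn.go ['\n'] fuel l cur acc = acc.reverse ++ fbpSp l cur := by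
  intro fuel
  induction fuel with
  | zero => intro l cur acc h; omega
  | succ m ih =>
    intro l cur acc h
    match l with
    | [] => simp [PySem.Chars.splitOn.go, fbpSp]
    | c :: rest =>
      by_cases hc : c = '\n'
      · subst hc
        have hstep : PySem.Chars.splitOn.go ['\n'] (m + 1) ('\n' :: rest) cur acc
            = PySem.Chars.splitOn.go ['\n'] m rest [] (cur.reverse :: acc) := by
          rw [PySem.Chars.splitOn.go]
          rw [if_pos (by simp [List.isPrefixOf])]
          simp
        rw [hstep, ih rest [] (cur.reverse :: acc) (by simp at h; omega)]
        simp [fbpSp]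
      · have hstep : PySem.Chars.splitOn.go ['\n'] (m + 1) (c :: rest) cur acc
            = PySem.Chars.splitOn.go ['\n'] m rest (c :: cur) acc := by
          rw [PySem.Chars.splitOn.go]
          rw [if_neg (by simp [List.isPrefixOf]; exact fun hx => hc hx.symm)]
        rw [hstep, ih rest (c :: cur) acc (by simp at h; omega)]
        simp [fbpSp, hc]

theorem foldl_snoc {α β : Type} (f : α → β) : ∀ (l : List α) (acc : List β),
    l.foldl (fun a x => a ++ [f x]) acc = acc ++ l.map f := by
  intro l
  induction l with
  | nil => simp
  | cons x xs ih => intro acc; simp [List.foldl, ih]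

-- A's output rewritten through fbpSp
theorem portA_eq (content : String) :
    format_bullet_points_py content =
      String.ofList (PySem.Chars.join ['\n'] ((fbpSp content.toList []).map fbpLine)) := by
  unfold format_bullet_points_py
  rw [show PySem.Chars.split? content.toList ['\n'] = some (PySem.Chars.splitOn content.toList ['\n']) by
    simp [PySem.Chars.split?]]
  unfold PySem.Chars.splitOn
  rw [go_spec (content.toList.length + 1) content.toList [] [] (by omega)]
  show String.ofList (PySem.Chars.join ['\n']
    ((fbpSp content.toList []).foldl (fun acc line => acc ++ [fbpLine line]) [])) = _
  rw [foldl_snoc fbpLine]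
  rfl

-- pulling a common prefix of the first part out of a join
theorem join_cons_append (sep p t : List Char) (L : List (List Char)) :
    PySem.Chars.join sep ((p ++ t) :: L) = p ++ PySem.Chars.join sep (t :: L) := by
  match L with
  | [] => simp [PySem.Chars.join_singleton]
  | q :: L' => simp [PySem.Chars.join_cons_cons]

-- B's output in the mid-line state: first part verbatim, later parts transformed
def fbpG : List (List Char) → List Char
  | [] => []
  | t :: ls => PySem.Chars.join ['\n'] (t :: ls.map fbpLine)

theorem fbpLine_nil : fbpLine [] = [] := by
  simp [fbpLine, PySem.Chars.startswith, List.isPrefixOf]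

theorem fbpGo_nil (b : Bool) : fbpGo b [] = [] := by rw [fbpGo]

theorem fbpGo_cons (b : Bool) (c : Char) (rest : List Char) :
    fbpGo b (c :: rest) =
      if b = true ∧ c = '-' ∧ rest.head? = some ' '
      then '•' :: ' ' :: fbpGo false rest.tail
      else c :: fbpGo (c == '\n') rest := by rw [fbpGo]

theorem main_lemma : ∀ (n : Nat) (cs : List Char), cs.length ≤ n →
    fbpGo true cs = PySem.Chars.join ['\n'] ((fbpSp cs []).map fbpLine) ∧
    fbpGo false cs = fbpG (fbpSp cs []) := by
  intro n
  induction n with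
  | zero =>
    intro cs h
    have hnil : cs = [] := List.length_eq_zero_iff.mp (Nat.le_zero.mp h)
    subst hnil
    exact ⟨by simp [fbpGo_nil, fbpSp, fbpLine_nil, PySem.Chars.join_singleton],
           by simp [fbpGo_nil, fbpSp, fbpG, PySem.Chars.join_singleton]⟩
  | succ m ih =>
    intro cs h
    match cs with
    | [] =>
      exact ⟨by simp [fbpGo_nil, fbpSp, fbpLine_nil, PySem.Chars.join_singleton],
             by simp [fbpGo_nil, fbpSp, fbpG, PySem.Chars.join_singleton]⟩
    | c :: rest =>
      have hr : rest.length ≤ m := by simp at h; omega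
      obtain ⟨ihT, ihF⟩ := ih rest hr
      obtain ⟨t, ls, hsp, _⟩ := fbpSp_cons rest []
      constructor
      · -- line-start state
        by_cases hb : c = '-' ∧ rest.head? = some ' '
        · obtain ⟨hc, hs⟩ := hb
          subst hc
          obtain ⟨rest', hrest⟩ : ∃ rest', rest = ' ' :: rest' := by
            cases rest with
            | nil => simp at hs
            | cons x r => simp at hs; exact ⟨r, by rw [hs]⟩
          subst hrest
          obtain ⟨_, ihF'⟩ := ih rest' (by simp at h; omega)
          obtain ⟨t', ls', hsp', hsp2⟩ := fbpSp_cons rest' [' ', '-']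
          rw [fbpGo_cons, if_pos (by simp)]
          show '•' :: ' ' :: fbpGo false rest' = _
          rw [ihF', hsp']
          rw [show fbpSp ('-' :: ' ' :: rest') [] = fbpSp rest' [' ', '-'] by simp [fbpSp], hsp2]
          have hline : fbpLine ([' ', '-'].reverse ++ t') = '•' :: ' ' :: t' := by
            simp only [fbpLine]
            rw [if_pos (by simp [PySem.Chars.startswith, List.isPrefixOf])]
            rw [show ([' ', '-'].reverse ++ t' : List Char) = '-' :: ' ' :: t' from rfl]
            rw [show PySem.Chars.slice ('-' :: ' ' :: t') (some 2) none
                  = PySem.List.slice ('-' :: ' ' :: t') (some 2) none from rfl]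
            rw [PySem.List.slice_from _ (by norm_num : (0 : Int) ≤ 2)]
            rfl
          show '•' :: ' ' :: fbpG (t' :: ls')
            = PySem.Chars.join ['\n'] (fbpLine ([' ', '-'].reverse ++ t') :: ls'.map fbpLine)
          rw [hline]
          show _ = PySem.Chars.join ['\n'] ((['•', ' '] ++ t') :: ls'.map fbpLine)
          rw [join_cons_append]
          rfl
        · rw [fbpGo_cons, if_neg (by simp; intro h1; exact fun h2 => hb ⟨h1, h2⟩)]
          by_cases hc : c = '\n'
          · subst hc
            simp only [show (('\n' : Char) == '\n') = true by simp]
            rw [ihT, hsp]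
            rw [show fbpSp ('\n' :: rest) [] = [] :: fbpSp rest [] by simp [fbpSp], hsp]
            show '\n' :: PySem.Chars.join ['\n'] (fbpLine t :: ls.map fbpLine)
              = PySem.Chars.join ['\n'] (fbpLine [] :: fbpLine t :: ls.map fbpLine)
            rw [fbpLine_nil, PySem.Chars.join_cons_cons]
            rfl
          · simp only [show (c == '\n') = false by simp [hc]]
            rw [ihF, hsp]
            obtain ⟨t2, ls2, hsp1, hsp2⟩ := fbpSp_cons rest [c]
            rw [show fbpSp (c :: rest) [] = fbpSp rest [c] by simp [fbpSp, hc], hsp2]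
            have heq : t2 :: ls2 = t :: ls := hsp1.symm.trans hsp
            injection heq with ht hls
            subst ht; subst hls
            have hline : fbpLine ([c].reverse ++ t2) = c :: t2 := by
              simp only [fbpLine]
              rw [if_neg ?_]
              · rfl
              intro hpre
              have hp : c = '-' ∧ t2.head? = some ' ' := by
                cases t2 with
                | nil => simp [PySem.Chars.startswith, List.isPrefixOf] at hpre
                | cons x r =>
                  simp [PySem.Chars.startswith, List.isPrefixOf] at hpre
                  exact ⟨hpre.1.symm, by simp; exact hpre.2.symm⟩
              exact hb ⟨hp.1, fbpSp_head_sub rest t2 ls2 hsp1 ' ' hp.2⟩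
            show c :: fbpG (t2 :: ls2)
              = PySem.Chars.join ['\n'] (fbpLine ([c].reverse ++ t2) :: ls2.map fbpLine)
            rw [hline]
            rw [show (c :: t2 : List Char) = [c] ++ t2 from rfl, join_cons_append]
            rfl
      · -- mid-line state
        rw [fbpGo_cons, if_neg (by simp)]
        by_cases hc : c = '\n'
        · subst hc
          simp only [show (('\n' : Char) == '\n') = true by simp]
          rw [ihT, hsp]
          rw [show fbpSp ('\n' :: rest) [] = [] :: fbpSp rest [] by simp [fbpSp], hsp]
          show '\n' :: PySem.Chars.join ['\n'] (fbpLine t :: ls.map fbpLine)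
            = fbpG ([] :: t :: ls)
          show _ = PySem.Chars.join ['\n'] ([] :: fbpLine t :: ls.map fbpLine)
          rw [PySem.Chars.join_cons_cons]
          rfl
        · simp only [show (c == '\n') = false by simp [hc]]
          rw [ihF, hsp]
          obtain ⟨t2, ls2, hsp1, hsp2⟩ := fbpSp_cons rest [c]
          rw [show fbpSp (c :: rest) [] = fbpSp rest [c] by simp [fbpSp, hc], hsp2]
          have heq : t2 :: ls2 = t :: ls := hsp1.symm.trans hsp
          injection heq with ht hls
          subst ht; subst hls
          show c :: fbpG (t2 :: ls2) = fbpG (([c].reverse ++ t2) :: ls2)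
          show _ = PySem.Chars.join ['\n'] (([c] ++ t2) :: ls2.map fbpLine)
          rw [join_cons_append]
          rfl

-- ===== VERDICT (by name: the statement is the Claim_ definition above) =====
theorem format_bullet_points_py_spec : Claim_equal_format_bullet_points_py := by
  intro content _
  unfold Spec_format_bullet_points_py format_bullet_points_py_alt
  rw [portA_eq]
  exact congrArg String.ofList ((main_lemma content.toList.length content.toList le_rfl).1).symm
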